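-- pv_equiv track=rewrite | github.com/JayadevArun/Leetcode | 1798-max-number-of-k-sum-pairs/max-number-of-k-sum-pairs.py | maxOperations
-- ===== SOURCE A (Python) =====
-- from typing import List
--
-- def maxOperations(nums: List[int], k: int) -> int:
--     d = {}
--     c = 0
--     for num in nums:
--         t=k-num
--         if t in d and d[t] > 0:
--             d[t] -= 1
--             c += 1
--         else:
--             if num in d:
--                 d[num] += 1
--             else:
--                 d[num] = 1
--     return c
-- ===== SOURCE B (Python) =====
-- def maxOperations(nums, k):
--     cnt = {}
--     for x in nums:
--         cnt[x] = cnt.get(x, 0) + 1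
--     ans = 0
--     for v, c in cnt.items():
--         if 2 * v == k:
--             ans += c // 2
--         elif v < k - v:
--             ans += min(c, cnt.get(k - v, 0))
--     return ans
-- ===== Notes on version B (the rewrite author's own statement) =====
-- stated objective: alternative
-- what changed: Replaces A's online greedy pairing (a dict of still-unmatched counts, decremented as complements arrive) by building a full frequency counter once and summing the closed form min(count[v], count[k-v]) over each complement pair plus count[k/2]//2 for the self-complementary value.
import Mathlib
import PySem

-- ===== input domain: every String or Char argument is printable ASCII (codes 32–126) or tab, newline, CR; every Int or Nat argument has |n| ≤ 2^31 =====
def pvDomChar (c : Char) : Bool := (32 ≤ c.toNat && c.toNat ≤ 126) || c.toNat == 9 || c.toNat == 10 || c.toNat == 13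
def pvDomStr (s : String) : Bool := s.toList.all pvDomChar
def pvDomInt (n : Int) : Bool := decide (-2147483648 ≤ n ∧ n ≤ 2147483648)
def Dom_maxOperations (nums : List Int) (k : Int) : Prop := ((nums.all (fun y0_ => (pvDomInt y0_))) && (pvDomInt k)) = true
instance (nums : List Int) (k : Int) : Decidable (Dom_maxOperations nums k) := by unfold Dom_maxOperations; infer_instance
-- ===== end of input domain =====

-- B replaces A's online greedy pairing with a frequency counter and the closed form
-- min(count[v], count[k-v]) per complement pair (plus count[k/2]//2); same O(n) cost.

-- ===== PORT A =====
-- loop body of A's 'for num in nums', state = (d, c)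
def maxOpStep (k : Int) (st : PySem.Dict Int Int × Int) (num : Int) : PySem.Dict Int Int × Int :=
  let d := st.1
  let c := st.2
  let t := k - num
  if d.contains t && decide (0 < d.getD t 0) then
    (d.insert t (d.getD t 0 - 1), c + 1)
  else if d.contains num then
    (d.modify num 0 (· + 1), c)
  else
    (d.insert num 1, c)

def maxOperations (nums : List Int) (k : Int) : Int :=
  (nums.foldl (maxOpStep k) (PySem.Dict.empty, 0)).2

-- ===== PORT B =====
def maxOperations_alt (nums : List Int) (k : Int) : Int :=
  let cnt := nums.foldl (fun (d : PySem.Dict Int Int) x => d.insert x (d.getD x 0 + 1)) PySem.Dict.empty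
  cnt.items.foldl (fun ans p =>
    if 2 * p.1 = k then ans + PySem.Int.floordiv p.2 2
    else if p.1 < k - p.1 then ans + min p.2 (cnt.getD (k - p.1) 0)
    else ans) 0

-- ===== PRECONDITION & SPEC =====
def Spec_maxOperations (nums : List Int) (k : Int) (out : Int) : Prop := out = maxOperations_alt nums k
instance (nums : List Int) (k : Int) (out : Int) : Decidable (Spec_maxOperations nums k out) := by unfold Spec_maxOperations; infer_instance

-- ===== CLAIM (what is proved, stated in full; the proofs are below) =====
def Claim_equal_maxOperations : Prop := ∀ (nums : List Int) (k : Int), Dom_maxOperations nums k → Spec_maxOperations nums k (maxOperations nums k)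

-- ===== LEMMAS AND PROOFS =====

-- number of k-sum pairs contributed by the distinct value v of m
def pairTerm (m : List Int) (k v : Int) : Int :=
  if 2 * v = k then ((List.count v m / 2 : Nat) : Int)
  else if v < k - v then ((min (List.count v m) (List.count (k - v) m) : Nat) : Int)
  else 0

-- count of copies of v in m left unmatched by the greedy pairing
def leftover (m : List Int) (k v : Int) : Int :=
  if 2 * v = k then ((List.count v m % 2 : Nat) : Int)
  else ((List.count v m - List.count (k - v) m : Nat) : Int)

-- total number of k-sum pairs in m (the value both programs compute)
def pairSum (m : List Int) (k : Int) : Int := ((PySem.Set.ofList m).map (pairTerm m k)).sum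

lemma pairTerm_self {k v : Int} (m : List Int) (h : 2 * v = k) :
    pairTerm m k v = ((List.count v m / 2 : Nat) : Int) := by simp [pairTerm, h]

lemma pairTerm_lt {k v : Int} (m : List Int) (h : ¬ 2 * v = k) (hlt : v < k - v) :
    pairTerm m k v = ((min (List.count v m) (List.count (k - v) m) : Nat) : Int) := by
  simp [pairTerm, h, hlt]

lemma pairTerm_gt {k v : Int} (m : List Int) (h : ¬ 2 * v = k) (hlt : ¬ v < k - v) :
    pairTerm m k v = 0 := by simp [pairTerm, h, hlt]

lemma leftover_self {k v : Int} (m : List Int) (h : 2 * v = k) :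
    leftover m k v = ((List.count v m % 2 : Nat) : Int) := by simp [leftover, h]

lemma leftover_ne {k v : Int} (m : List Int) (h : ¬ 2 * v = k) :
    leftover m k v = ((List.count v m - List.count (k - v) m : Nat) : Int) := by
  simp [leftover, h]

lemma count_append_one (m : List Int) (x v : Int) :
    List.count v (m ++ [x]) = List.count v m + (if x = v then 1 else 0) := by
  rcases eq_or_ne x v with h | h
  · subst h; simp [List.count_append]
  · simp [List.count_append, List.count_singleton', h]

lemma count_append_self (m : List Int) (x : Int) :
    List.count x (m ++ [x]) = List.count x m + 1 := by
  rw [count_append_one]; simp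

lemma count_append_other (m : List Int) {x v : Int} (h : x ≠ v) :
    List.count v (m ++ [x]) = List.count v m := by
  rw [count_append_one]; simp [h]

lemma sum_map_diff_one (f g : Int → Int) (a : Int) :
    ∀ (l : List Int), l.Nodup → (∀ v ∈ l, v ≠ a → f v = g v) →
      (l.map f).sum = (l.map g).sum + (if a ∈ l then f a - g a else 0) := by
  intro l
  induction l with
  | nil => simp
  | cons c tl ih =>
    intro hnd h
    have hc_nin : c ∉ tl := (List.nodup_cons.mp hnd).1
    have htl := ih (List.nodup_cons.mp hnd).2
      (fun v hv hva => h v (List.mem_cons_of_mem _ hv) hva)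
    by_cases hc : c = a
    · subst hc
      have : (if c ∈ tl then f c - g c else 0) = 0 := by simp [hc_nin]
      simp only [List.map_cons, List.sum_cons, htl, this, add_zero, List.mem_cons_self,
        if_pos]
      ring
    · have hfc : f c = g c := h c (List.mem_cons_self) hc
      have hmem : (a ∈ c :: tl) = (a ∈ tl) := by
        simp only [List.mem_cons, eq_iff_iff]
        constructor
        · rintro (h' | h')
          · exact absurd h'.symm hc
          · exact h'
        · exact Or.inr
      simp only [List.map_cons, List.sum_cons, htl, hfc, hmem]
      ring

lemma sum_map_diff_two (f g : Int → Int) (a b : Int) (hab : a ≠ b) (l : List Int)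
    (hnd : l.Nodup) (h : ∀ v ∈ l, v ≠ a → v ≠ b → f v = g v) :
    (l.map f).sum = (l.map g).sum + (if a ∈ l then f a - g a else 0)
      + (if b ∈ l then f b - g b else 0) := by
  have h1 := sum_map_diff_one f (fun v => if v = b then f v else g v) a l hnd
    (by intro v hv hva; by_cases hvb : v = b <;> simp [hvb, h v hv hva])
  have h2 := sum_map_diff_one (fun v => if v = b then f v else g v) g b l hnd
    (by intro v hv hvb; simp [hvb])
  rw [h1, h2]
  simp [hab]
  ring

lemma pairTerm_untouched (m : List Int) (k x v : Int) (hvx : v ≠ x) (hvt : v ≠ k - x) :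
    pairTerm (m ++ [x]) k v = pairTerm m k v := by
  have h1 : ¬ x = v := fun h => hvx h.symm
  have h2 : ¬ x = k - v := fun h => hvt (by omega)
  simp only [pairTerm, count_append_one, if_neg h1, if_neg h2, add_zero]

lemma ofList_append_mem (m : List Int) {x : Int} (hx : x ∈ m) :
    PySem.Set.ofList (m ++ [x]) = PySem.Set.ofList m := by
  rw [PySem.Set.ofList_append_singleton, PySem.Set.add_eq_ite,
    if_pos ((PySem.Set.mem_ofList m x).mpr hx)]

lemma ofList_append_not_mem (m : List Int) {x : Int} (hx : x ∉ m) :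
    PySem.Set.ofList (m ++ [x]) = PySem.Set.ofList m ++ [x] := by
  rw [PySem.Set.ofList_append_singleton, PySem.Set.add_eq_ite,
    if_neg (fun h => hx ((PySem.Set.mem_ofList m x).mp h))]

lemma pairSum_append (m : List Int) (k x : Int) :
    pairSum (m ++ [x]) k = pairSum m k + (if 0 < leftover m k (k - x) then 1 else 0) := by
  have hkk : k - (k - x) = x := by ring
  by_cases h2 : 2 * x = k
  · -- self-complementary value: only the term at x changes
    have ht : k - x = x := by omega
    have hkey : ∀ v ∈ PySem.Set.ofList m, v ≠ x →
        pairTerm (m ++ [x]) k v = pairTerm m k v := by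
      intro v _ hvx
      exact pairTerm_untouched m k x v hvx (by omega)
    have hlo : leftover m k (k - x) = ((List.count x m % 2 : Nat) : Int) := by
      rw [ht, leftover_self m h2]
    by_cases hx : x ∈ m
    · have hmem : x ∈ PySem.Set.ofList m := (PySem.Set.mem_ofList m x).mpr hx
      have hdelta : pairTerm (m ++ [x]) k x - pairTerm m k x
          = (if 0 < leftover m k (k - x) then 1 else 0) := by
        rw [pairTerm_self _ h2, pairTerm_self _ h2, count_append_self, hlo]
        split_ifs with h <;> omega
      unfold pairSum
      rw [ofList_append_mem m hx,
        sum_map_diff_one (pairTerm (m ++ [x]) k) (pairTerm m k) x _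
          (PySem.Set.nodup_ofList m) hkey, if_pos hmem, hdelta]
    · have hnm : x ∉ PySem.Set.ofList m := fun h => hx ((PySem.Set.mem_ofList m x).mp h)
      have hc0 : List.count x m = 0 := List.count_eq_zero_of_not_mem hx
      have hterm : pairTerm (m ++ [x]) k x = (if 0 < leftover m k (k - x) then 1 else 0) := by
        rw [pairTerm_self _ h2, count_append_self, hlo, hc0]
        norm_num
      unfold pairSum
      rw [ofList_append_not_mem m hx, List.map_append, List.sum_append,
        sum_map_diff_one (pairTerm (m ++ [x]) k) (pairTerm m k) x _
          (PySem.Set.nodup_ofList m) hkey, if_neg hnm]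
      simp only [List.map_cons, List.map_nil, List.sum_cons, List.sum_nil, hterm]
      ring
  · -- x and its complement are distinct; at most the terms at x and k-x change
    have hne : x ≠ k - x := by omega
    have h2t : ¬ 2 * (k - x) = k := by omega
    have hkey : ∀ v ∈ PySem.Set.ofList m, v ≠ x → v ≠ k - x →
        pairTerm (m ++ [x]) k v = pairTerm m k v := by
      intro v _ hvx hvt
      exact pairTerm_untouched m k x v hvx hvt
    have hct : List.count (k - x) (m ++ [x]) = List.count (k - x) m :=
      count_append_other m hne
    have hlo : leftover m k (k - x)
        = ((List.count (k - x) m - List.count x m : Nat) : Int) := by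
      rw [leftover_ne m h2t, hkk]
    -- the per-value deltas
    have hdt : pairTerm (m ++ [x]) k (k - x) - pairTerm m k (k - x)
        = if k - x < x then
            ((min (List.count (k - x) m) (List.count x m + 1) : Nat) : Int)
              - ((min (List.count (k - x) m) (List.count x m) : Nat) : Int)
          else 0 := by
      by_cases hlt : k - x < k - (k - x)
      · rw [pairTerm_lt _ h2t hlt, pairTerm_lt _ h2t hlt, hkk, hct, count_append_self]
        rw [if_pos (by omega : k - x < x)]
      · rw [pairTerm_gt _ h2t hlt, pairTerm_gt _ h2t hlt,
          if_neg (by omega : ¬ k - x < x)]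
        ring
    by_cases hx : x ∈ m
    · have hmem : x ∈ PySem.Set.ofList m := (PySem.Set.mem_ofList m x).mpr hx
      have hdx : pairTerm (m ++ [x]) k x - pairTerm m k x
          = if x < k - x then
              ((min (List.count x m + 1) (List.count (k - x) m) : Nat) : Int)
                - ((min (List.count x m) (List.count (k - x) m) : Nat) : Int)
            else 0 := by
        by_cases hlt : x < k - x
        · rw [pairTerm_lt _ h2 hlt, pairTerm_lt _ h2 hlt, hct, count_append_self,
            if_pos hlt]
        · rw [pairTerm_gt _ h2 hlt, pairTerm_gt _ h2 hlt, if_neg hlt]; ring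
      unfold pairSum
      rw [ofList_append_mem m hx,
        sum_map_diff_two (pairTerm (m ++ [x]) k) (pairTerm m k) x (k - x) hne _
          (PySem.Set.nodup_ofList m) hkey, if_pos hmem, hdx, hdt, hlo]
      by_cases htm : (k - x) ∈ m
      · rw [if_pos ((PySem.Set.mem_ofList m _).mpr htm)]
        split_ifs <;> omega
      · have hct0 : List.count (k - x) m = 0 := List.count_eq_zero_of_not_mem htm
        rw [if_neg (fun h => htm ((PySem.Set.mem_ofList m _).mp h)), hct0]
        split_ifs <;> omega
    · have hnm : x ∉ PySem.Set.ofList m := fun h => hx ((PySem.Set.mem_ofList m x).mp h)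
      have hc0 : List.count x m = 0 := List.count_eq_zero_of_not_mem hx
      have hterm : pairTerm (m ++ [x]) k x
          = if x < k - x then ((min 1 (List.count (k - x) m) : Nat) : Int) else 0 := by
        by_cases hlt : x < k - x
        · rw [pairTerm_lt _ h2 hlt, hct, count_append_self, hc0, if_pos hlt]
        · rw [pairTerm_gt _ h2 hlt, if_neg hlt]
      unfold pairSum
      rw [ofList_append_not_mem m hx, List.map_append, List.sum_append,
        sum_map_diff_two (pairTerm (m ++ [x]) k) (pairTerm m k) x (k - x) hne _
          (PySem.Set.nodup_ofList m) hkey, if_neg hnm]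
      simp only [List.map_cons, List.map_nil, List.sum_cons, List.sum_nil, hterm, hdt,
        hlo, hc0, add_zero]
      by_cases htm : (k - x) ∈ m
      · rw [if_pos ((PySem.Set.mem_ofList m _).mpr htm)]
        split_ifs <;> omega
      · have hct0 : List.count (k - x) m = 0 := List.count_eq_zero_of_not_mem htm
        rw [if_neg (fun h => htm ((PySem.Set.mem_ofList m _).mp h)), hct0]
        split_ifs <;> omega

lemma leftover_untouched (m : List Int) (k x v : Int) (hvx : v ≠ x) (hvt : v ≠ k - x) :
    leftover (m ++ [x]) k v = leftover m k v := by
  have h1 : ¬ x = v := fun h => hvx h.symm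
  have h2 : ¬ x = k - v := fun h => hvt (by omega)
  simp only [leftover, count_append_one, if_neg h1, if_neg h2, add_zero]

lemma leftover_append_matched (m : List Int) (k x : Int)
    (h : 0 < leftover m k (k - x)) (v : Int) :
    leftover (m ++ [x]) k v = if v = k - x then leftover m k (k - x) - 1 else leftover m k v := by
  have hkk : k - (k - x) = x := by ring
  rcases eq_or_ne v (k - x) with hv | hv
  · subst hv
    rw [if_pos rfl]
    by_cases h2 : 2 * x = k
    · have ht : k - x = x := by omega
      rw [ht] at h ⊢
      rw [leftover_self _ h2, leftover_self _ h2, count_append_self]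
      rw [leftover_self _ h2] at h
      omega
    · have h2t : ¬ 2 * (k - x) = k := by omega
      rw [leftover_ne _ h2t, leftover_ne _ h2t, hkk, count_append_self,
        count_append_other m (by omega : x ≠ k - x)]
      rw [leftover_ne _ h2t, hkk] at h
      omega
  · rcases eq_or_ne v x with hvx | hvx
    · subst hvx
      have h2 : ¬ 2 * v = k := by intro hc; exact hv (by omega)
      have h2t : ¬ 2 * (k - v) = k := by omega
      rw [if_neg hv, leftover_ne _ h2, leftover_ne _ h2, count_append_self,
        count_append_other m (by omega : v ≠ k - v)]
      rw [leftover_ne _ h2t, hkk] at h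
      omega
    · rw [if_neg hv]
      exact leftover_untouched m k x v hvx hv

lemma leftover_append_unmatched (m : List Int) (k x : Int)
    (h : ¬ 0 < leftover m k (k - x)) (v : Int) :
    leftover (m ++ [x]) k v = if v = x then leftover m k v + 1 else leftover m k v := by
  have hkk : k - (k - x) = x := by ring
  rcases eq_or_ne v x with hv | hv
  · subst hv
    rw [if_pos rfl]
    by_cases h2 : 2 * v = k
    · have ht : k - v = v := by omega
      rw [ht] at h
      rw [leftover_self _ h2, leftover_self _ h2, count_append_self]
      rw [leftover_self _ h2] at h
      omega
    · have ht : ¬ 2 * (k - v) = k := by omega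
      rw [leftover_ne _ h2, leftover_ne _ h2, count_append_self,
        count_append_other m (by omega : v ≠ k - v)]
      rw [leftover_ne _ ht, hkk] at h
      omega
  · rcases eq_or_ne v (k - x) with hvt | hvt
    · subst hvt
      have h2 : ¬ 2 * (k - x) = k := by intro hc; exact hv (by omega)
      rw [if_neg hv, leftover_ne _ h2, leftover_ne _ h2, hkk, count_append_self,
        count_append_other m (by omega : x ≠ k - x)]
      rw [leftover_ne _ h2, hkk] at h
      omega
    · rw [if_neg hv]
      exact leftover_untouched m k x v hv hvt

lemma loop_eq (k : Int) : ∀ (rest m : List Int) (d : PySem.Dict Int Int) (c : Int),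
    (∀ v, d.getD v 0 = leftover m k v) →
    (rest.foldl (maxOpStep k) (d, c)).2 = c + pairSum (m ++ rest) k - pairSum m k := by
  intro rest
  induction rest with
  | nil => intro m d c _; simp
  | cons x rest ih =>
    intro m d c hd
    have hmx : m ++ x :: rest = (m ++ [x]) ++ rest := by simp
    have hcond : (d.contains (k - x) && decide (0 < d.getD (k - x) 0))
        = decide (0 < leftover m k (k - x)) := by
      cases hct : d.contains (k - x) with
      | false =>
        have h0 : leftover m k (k - x) = 0 := by
          rw [← hd (k - x), PySem.Dict.getD_of_not_contains d 0 hct]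
        simp [h0]
      | true => simp [hd (k - x)]
    simp only [List.foldl_cons]
    by_cases hm : 0 < leftover m k (k - x)
    · have hstep : maxOpStep k (d, c) x
          = (d.insert (k - x) (d.getD (k - x) 0 - 1), c + 1) := by
        simp only [maxOpStep, hcond]
        simp [hm]
      rw [hstep, ih (m ++ [x]) _ (c + 1) (by
        intro v
        rw [PySem.Dict.getD_insert, leftover_append_matched m k x hm v, hd v, hd (k - x)])]
      rw [hmx, pairSum_append]
      simp only [if_pos hm]
      omega
    · have hstep : maxOpStep k (d, c) x
          = (if d.contains x then (d.modify x 0 (· + 1), c) else (d.insert x 1, c)) := by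
        simp only [maxOpStep, hcond]
        rw [if_neg (by simpa using hm)]
      cases hdc : d.contains x with
      | false =>
        have h0 : leftover m k x = 0 := by
          rw [← hd x, PySem.Dict.getD_of_not_contains d 0 hdc]
        rw [hstep, hdc, if_neg (by simp)]
        rw [ih (m ++ [x]) _ c (by
          intro v
          rw [leftover_append_unmatched m k x hm v]
          simp only [PySem.Dict.getD_insert, hd v]
          split_ifs with hvx
          · subst hvx; omega
          · rfl)]
        rw [hmx, pairSum_append, if_neg hm]
        ring
      | true =>
        rw [hstep, hdc, if_pos (by simp)]
        rw [ih (m ++ [x]) _ c (by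
          intro v
          rw [leftover_append_unmatched m k x hm v]
          simp only [PySem.Dict.getD_modify, hd v, hd x]
          split_ifs with hvx
          · subst hvx; rfl
          · rfl)]
        rw [hmx, pairSum_append, if_neg hm]
        ring

lemma portA_eq (nums : List Int) (k : Int) : maxOperations nums k = pairSum nums k := by
  unfold maxOperations
  rw [loop_eq k nums [] PySem.Dict.empty 0 (by
    intro v
    simp [PySem.Dict.getD_empty, leftover])]
  simp [pairSum]

lemma portB_eq (nums : List Int) (k : Int) : maxOperations_alt nums k = pairSum nums k := by
  unfold maxOperations_alt
  simp only [PySem.Dict.foldl_insert_getD_add_one_eq_counter, PySem.Dict.items_counter,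
    List.foldl_map]
  have hfun : (fun (ans : Int) (v : Int) =>
      if 2 * v = k then ans + PySem.Int.floordiv ((List.count v nums : Nat) : Int) 2
      else if v < k - v then
        ans + min ((List.count v nums : Nat) : Int) ((PySem.Dict.counter nums).getD (k - v) 0)
      else ans)
      = fun ans v => ans + pairTerm nums k v := by
    funext ans v
    rw [PySem.Dict.getD_counter]
    unfold pairTerm
    split_ifs with h1 hlt
    · rw [show (2:Int) = ((2:Nat):Int) by norm_num, PySem.Int.floordiv_natCast]
    · rw [Nat.cast_min]
    · ring
  rw [hfun, PySem.List.foldl_add]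
  simp [pairSum]

-- ===== VERDICT (by name: the statement is the Claim_ definition above) =====
theorem maxOperations_spec : Claim_equal_maxOperations := by
  intro nums k _
  unfold Spec_maxOperations
  rw [portA_eq, portB_eq]
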